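-- pv_equiv track=rewrite | github.com/jonasstenling/pyskate | pyskate/utils.py | compare_proposed_to_running
-- ===== SOURCE A (Python) =====
-- def compare_proposed_to_running(proposed_config, running_config):
--     '''Return diff between *proposed_config* and *running_config*.'''
--
--     # remove empty lines from playbook
--     for line in proposed_config:
--         if len(line) == 0:
--             proposed_config.remove(line)
--
--     final_config = proposed_config[:]
--
--
--     # all commands starting with "no "
--     no_commands = [line.strip() for line in final_config if line.startswith('no ')]
--     # all other commands
--     commands = [line.strip() for line in final_config if not line.startswith('no ')]
--
--     # commands starting with "no " that have a matching line in running_config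
--     # which means that it shall be included in the final_config committed to
--     # device. all other "no " commands shall be disregarded when committing
--     # the configuration.
--     no_commands_real = []
--
--     for line in running_config:
--         for no_line in no_commands:
--             if line == no_line.lstrip('no '):
--                 no_commands_real.append(no_line)
--         if line in commands:
--             commands.remove(line)
--
--     return commands + no_commands_real
-- ===== SOURCE B (Python) =====
-- def compare_proposed_to_running(proposed_config, running_config):
--     '''Return diff between *proposed_config* and *running_config*.'''
--     # drop empty lines up front (does not mutate the argument)
--     cleaned = [line for line in proposed_config if line]
--
--     # group "no " commands by their lstrip('no ') key: one dict lookup per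
--     # running line instead of a scan over all "no " commands
--     no_pairs = [(line.strip().lstrip('no '), line.strip())
--                 for line in cleaned if line.startswith('no ')]
--     groups = {}
--     for k, v in no_pairs:
--         groups.setdefault(k, []).append(v)
--
--     commands = [line.strip() for line in cleaned if not line.startswith('no ')]
--
--     # counted removal: each running line cancels one matching command
--     need = {}
--     for line in running_config:
--         need[line] = need.get(line, 0) + 1
--     remaining = []
--     for cmd in commands:
--         n = need.get(cmd, 0)
--         if n > 0:
--             need[cmd] = n - 1
--         else:
--             remaining.append(cmd)
--
--     no_commands_real = []
--     for line in running_config: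
--         no_commands_real += groups.get(line, [])
--
--     return remaining + no_commands_real
-- ===== Notes on version B (the rewrite author's own statement) =====
-- stated objective: faster
-- what changed: B replaces A's O(R*N) inner scan over 'no '-commands by a dict grouping them under their lstrip('no ') key and A's repeated guarded list.remove (an O(C) scan per running line) by a counter of running lines with one counted-removal pass over the commands; B drops empty lines with a plain filter and does not mutate its argument.
-- intended difference: On proposed configs with adjacent empty lines (and too few empty running lines to cancel them), A's iterate-while-removing pass leaves empty lines among the returned commands, contradicting its own 'remove empty lines' comment; B removes all empty lines, which is the intended value. — e.g. on compare_proposed_to_running(["", "", "a"], []): A returns ["", "a"], B returns ["a"]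
import Mathlib
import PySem

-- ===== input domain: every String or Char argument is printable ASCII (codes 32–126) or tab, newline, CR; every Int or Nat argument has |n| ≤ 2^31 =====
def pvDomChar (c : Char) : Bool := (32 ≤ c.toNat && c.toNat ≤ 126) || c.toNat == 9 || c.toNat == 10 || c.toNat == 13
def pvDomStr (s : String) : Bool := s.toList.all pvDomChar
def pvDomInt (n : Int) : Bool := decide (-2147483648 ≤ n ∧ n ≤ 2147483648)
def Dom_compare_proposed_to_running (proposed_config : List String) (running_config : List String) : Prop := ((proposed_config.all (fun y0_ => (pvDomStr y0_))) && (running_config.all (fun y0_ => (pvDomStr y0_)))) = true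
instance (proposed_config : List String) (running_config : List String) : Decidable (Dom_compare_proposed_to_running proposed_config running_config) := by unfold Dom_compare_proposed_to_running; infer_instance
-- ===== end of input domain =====

-- B: same diff, but dict/counter passes instead of A's nested scans (objective: faster);
-- B simply drops all empty lines where A's iterate-while-removing pass can leave one (D_ below).
-- A also mutates proposed_config in place; the equivalence proved here is about the return value only.

-- ===== PORT A =====
-- shared key helper: hand-port of  s.lstrip('no ')  — drop leading chars from {'n','o',' '}
-- (exact: Python's str.lstrip(chars) removes leading characters that occur in chars)
def pvLstripNo (s : String) : String :=
  String.ofList (s.toList.dropWhile (fun c => c == 'n' || c == 'o' || c == ' '))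

-- 'for line in proposed_config: if len(line) == 0: proposed_config.remove(line)'
-- Python iterates by index over the shrinking list; remove deletes the first equal element.
-- fuel only makes the recursion structural: xs.length steps always suffice (i grows by 1
-- each step and the list never grows), so the fuel never runs out before i ≥ len(xs)
def pvRemovePassGo : Nat → List String → Nat → List String
  | 0, xs, _ => xs
  | fuel + 1, xs, i =>
    if h : i < xs.length then
      if PySem.Str.len xs[i] == 0 then pvRemovePassGo fuel (xs.erase xs[i]) (i + 1)
      else pvRemovePassGo fuel xs (i + 1)
    else xs

def pvRemovePass (xs : List String) : List String := pvRemovePassGo xs.length xs 0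

def compare_proposed_to_running (proposed_config : List String) (running_config : List String) : List String :=
  let final_config := pvRemovePass proposed_config
  let no_commands := (final_config.filter (fun l => PySem.Str.startswith l "no ")).map PySem.Str.strip
  let commands := (final_config.filter (fun l => !PySem.Str.startswith l "no ")).map PySem.Str.strip
  let res := running_config.foldl (fun s line =>
      (no_commands.foldl (fun acc nl => if line == pvLstripNo nl then acc ++ [nl] else acc) s.1,
       if s.2.contains line then s.2.erase line else s.2))
    (([] : List String), commands)
  res.2 ++ res.1

-- ===== PORT B =====
def compare_proposed_to_running_alt (proposed_config : List String) (running_config : List String) : List String :=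
  let cleaned := proposed_config.filter (fun l => !(l == ""))
  let no_pairs := (cleaned.filter (fun l => PySem.Str.startswith l "no ")).map
      (fun l => (pvLstripNo (PySem.Str.strip l), PySem.Str.strip l))
  let groups := no_pairs.foldl (fun d q => d.modify q.1 [] (fun x => x ++ [q.2]))
      (PySem.Dict.empty : PySem.Dict String (List String))
  let commands := (cleaned.filter (fun l => !PySem.Str.startswith l "no ")).map PySem.Str.strip
  let need := running_config.foldl (fun d l => d.modify l 0 (fun x => x + 1))
      (PySem.Dict.empty : PySem.Dict String Int)
  let res := commands.foldl (fun s cmd =>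
      let n := s.2.getD cmd 0
      if 0 < n then (s.1, s.2.insert cmd (n - 1)) else (s.1 ++ [cmd], s.2))
    (([] : List String), need)
  let no_real := running_config.foldl (fun acc l => acc ++ groups.getD l []) []
  res.1 ++ no_real

-- ===== PRECONDITION & SPEC =====
-- pvS p = number of empty lines A's remove pass leaves behind: sum of floor(run/2)
-- over maximal runs of consecutive empty lines (a pairwise count, two at a time)
def pvS : List String → Nat
  | [] => 0
  | [_] => 0
  | x :: y :: t => if x = "" then (if y = "" then 1 + pvS t else pvS (y :: t)) else pvS (y :: t)

-- lines that are whitespace-only but not empty: both programs keep them as the command ""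
def pvWhitespaceOnly (l : String) : Bool :=
  (l.toList != []) && l.toList.all PySem.Chars.isspace

-- On proposed configs with adjacent empty lines, A's iterate-while-removing pass leaves
-- pvS p empty lines in the config, which surface as empty commands in A's result whenever
-- running_config does not contain enough empty lines to cancel them; B removes all empty
-- lines, the intended value.
def D_compare_proposed_to_running (proposed_config : List String) (running_config : List String) : Prop :=
  1 ≤ pvS proposed_config ∧
    running_config.count "" < proposed_config.countP pvWhitespaceOnly + pvS proposed_config
instance (proposed_config : List String) (running_config : List String) : Decidable (D_compare_proposed_to_running proposed_config running_config) := by unfold D_compare_proposed_to_running; infer_instance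

def Spec_compare_proposed_to_running (proposed_config : List String) (running_config : List String) (out : List String) : Prop := ¬ D_compare_proposed_to_running proposed_config running_config → out = compare_proposed_to_running_alt proposed_config running_config
instance (proposed_config : List String) (running_config : List String) (out : List String) : Decidable (Spec_compare_proposed_to_running proposed_config running_config out) := by unfold Spec_compare_proposed_to_running; infer_instance

def pvDiffWitness_compare_proposed_to_running : List String × List String := (["", "", "a"], [])
def pvDiffWitnessOut_compare_proposed_to_running : (List String) × (List String) := (["", "a"], ["a"])

-- ===== CLAIM (what is proved, stated in full; the proofs are below) =====
def Claim_unchanged_compare_proposed_to_running : Prop := ∀ (proposed_config : List String) (running_config : List String), Dom_compare_proposed_to_running proposed_config running_config → Spec_compare_proposed_to_running proposed_config running_config (compare_proposed_to_running proposed_config running_config)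
def Claim_changed_compare_proposed_to_running : Prop := Dom_compare_proposed_to_running (pvDiffWitness_compare_proposed_to_running.1) (pvDiffWitness_compare_proposed_to_running.2) ∧ D_compare_proposed_to_running (pvDiffWitness_compare_proposed_to_running.1) (pvDiffWitness_compare_proposed_to_running.2) ∧ compare_proposed_to_running (pvDiffWitness_compare_proposed_to_running.1) (pvDiffWitness_compare_proposed_to_running.2) = pvDiffWitnessOut_compare_proposed_to_running.1 ∧ compare_proposed_to_running_alt (pvDiffWitness_compare_proposed_to_running.1) (pvDiffWitness_compare_proposed_to_running.2) = pvDiffWitnessOut_compare_proposed_to_running.2 ∧ pvDiffWitnessOut_compare_proposed_to_running.1 ≠ pvDiffWitnessOut_compare_proposed_to_running.2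
def Claim_exact_compare_proposed_to_running : Prop := ∀ (proposed_config : List String) (running_config : List String), Dom_compare_proposed_to_running proposed_config running_config → D_compare_proposed_to_running proposed_config running_config → compare_proposed_to_running proposed_config running_config ≠ compare_proposed_to_running_alt proposed_config running_config

-- ===== LEMMAS AND PROOFS =====

-- A's remove pass, abstracted: prefix accumulator A, untouched suffix of the original list;
-- a removal slides one unprocessed element into the prefix
def pvGoAbs : List String → List String → List String
  | A, [] => A
  | A, x :: rest =>
    if x == "" then
      if A.contains "" then
        match rest with
        | [] => A.erase "" ++ [""]
        | y :: rest' => pvGoAbs (A.erase "" ++ ["", y]) rest'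
      else
        match rest with
        | [] => A
        | y :: rest' => pvGoAbs (A ++ [y]) rest'
    else pvGoAbs (A ++ [x]) rest

-- old adjacency test, now only a proof device
def pvHasAdj : List String → Bool
  | x :: y :: rest => (x == "" && y == "") || pvHasAdj (y :: rest)
  | _ => false

lemma pvLenZero (s : String) : (PySem.Str.len s == 0) = (s == "") := by
  rw [Bool.eq_iff_iff]
  simp [PySem.Str.len_eq]

lemma pvStop (fuel : Nat) (xs : List String) (i : Nat) (h : xs.length ≤ i) :
    pvRemovePassGo fuel xs i = xs := by
  cases fuel with
  | zero => rfl
  | succ f => rw [pvRemovePassGo, dif_neg (by omega)]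

lemma pvGoLink : ∀ (n : Nat) (rest : List String) (fuel : Nat) (out : List String),
    rest.length ≤ n → rest.length ≤ fuel →
    pvRemovePassGo fuel (out ++ rest) out.length = pvGoAbs out rest := by
  intro n
  induction n with
  | zero =>
    intro rest fuel out h1 _
    have hr : rest = [] := List.eq_nil_of_length_eq_zero (by omega)
    subst hr
    rw [pvStop _ _ _ (by simp)]
    simp [pvGoAbs]
  | succ n ih =>
    intro rest fuel out h1 h2
    cases rest with
    | nil =>
      rw [pvStop _ _ _ (by simp)]
      simp [pvGoAbs]
    | cons x rest' =>
      obtain ⟨f, rfl⟩ : ∃ f, fuel = f + 1 := ⟨fuel - 1, by simp at h2; omega⟩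
      rw [pvRemovePassGo, dif_pos (by simp)]
      have hx : (out ++ x :: rest')[out.length]'(by simp) = x := by simp
      rw [hx]
      by_cases hc : x = ""
      · subst hc
        rw [if_pos (by rw [pvLenZero]; simp)]
        by_cases hA : "" ∈ out
        · rw [List.erase_append_left _ hA]
          have hlen : (out.erase "").length = out.length - 1 := List.length_erase_of_mem hA
          have hpos : 0 < out.length := List.length_pos_of_mem hA
          cases rest' with
          | nil =>
            rw [pvStop _ _ _ (by simp [hlen])]
            simp [pvGoAbs, hA]
          | cons y t =>
            rw [show out.erase "" ++ "" :: y :: t = (out.erase "" ++ ["", y]) ++ t from by simp,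
                show out.length + 1 = (out.erase "" ++ ["", y]).length from by simp [hlen]; omega]
            rw [ih t f _ (by simp at h1 ⊢; omega) (by simp at h2 ⊢; omega)]
            simp [pvGoAbs, hA]
        · rw [List.erase_append_right _ hA, List.erase_cons_head]
          cases rest' with
          | nil =>
            rw [pvStop _ _ _ (by simp)]
            simp [pvGoAbs, hA]
          | cons y t =>
            rw [show out ++ y :: t = (out ++ [y]) ++ t from by simp,
                show out.length + 1 = (out ++ [y]).length from by simp]
            rw [ih t f (out ++ [y]) (by simp at h1 ⊢; omega) (by simp at h2 ⊢; omega)]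
            simp [pvGoAbs, hA]
      · rw [if_neg (by rw [pvLenZero]; simpa using hc)]
        rw [show out ++ x :: rest' = (out ++ [x]) ++ rest' from by simp,
            show out.length + 1 = (out ++ [x]).length from by simp]
        rw [ih rest' f (out ++ [x]) (by simp at h1 ⊢; omega) (by simp at h2 ⊢; omega)]
        have : (x == "") = false := by simpa using hc
        conv_rhs => rw [pvGoAbs.eq_def]
        simp [this]

lemma pvRemovePass_eq (p : List String) : pvRemovePass p = pvGoAbs [] p := by
  have := pvGoLink p.length p p.length [] le_rfl le_rfl
  simpa [pvRemovePass] using this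

lemma pvFilterErase (l : List String) (h : "" ∈ l) (q : String → Bool) (hq : q "" = false) :
    (l.erase "").filter q = l.filter q := by
  obtain ⟨l1, l2, hn, he, hr⟩ := List.exists_erase_eq h
  rw [hr, he]
  simp [List.filter_append, hq]

lemma pvS_cons_ne (y : String) (t : List String) (h : ¬(y = "")) : pvS (y :: t) = pvS t := by
  cases t with
  | nil => rfl
  | cons z t' => simp [pvS, h]

lemma pvGoCount : ∀ (A rest : List String),
    (pvGoAbs A rest).count "" = A.count "" + pvS rest := by
  intro A rest
  fun_induction pvGoAbs A rest with
  | case1 A => simp [pvS]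
  | case2 A x hx hA =>
    have hm : "" ∈ A := by simpa using hA
    have hc : 1 ≤ A.count "" := List.one_le_count_iff.mpr hm
    simp [List.count_append, List.count_erase_self, pvS]
    omega
  | case3 A x hx hA y rest' ih =>
    have hm : "" ∈ A := by simpa using hA
    have hc : 1 ≤ A.count "" := List.one_le_count_iff.mpr hm
    have hxe : x = "" := by simpa using hx
    subst hxe
    rw [ih]
    by_cases hy : y = ""
    · subst hy
      simp [List.count_append, List.count_erase_self, pvS]
      omega
    · have h1 : pvS ("" :: y :: rest') = pvS (y :: rest') := by simp [pvS, hy]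
      rw [h1, pvS_cons_ne y rest' hy]
      simp [List.count_append, List.count_erase_self, hy]
      omega
  | case4 A x hx hA =>
    simp [pvS]
  | case5 A x hx hA y rest' ih =>
    have hxe : x = "" := by simpa using hx
    subst hxe
    rw [ih]
    by_cases hy : y = ""
    · subst hy
      simp [List.count_append, pvS]
      omega
    · have h1 : pvS ("" :: y :: rest') = pvS (y :: rest') := by simp [pvS, hy]
      rw [h1, pvS_cons_ne y rest' hy]
      simp [List.count_append, hy]
  | case6 A x rest hx ih =>
    have hxe : ¬(x = "") := by simpa using hx
    rw [ih, pvS_cons_ne x rest hxe]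
    simp [List.count_append, hxe]

lemma pvGoFilter (q : String → Bool) (hq : q "" = false) : ∀ (A rest : List String),
    (pvGoAbs A rest).filter q = A.filter q ++ rest.filter q := by
  intro A rest
  fun_induction pvGoAbs A rest with
  | case1 A => simp
  | case2 A x hx hA =>
    have hm : "" ∈ A := by simpa using hA
    have hxe : x = "" := by simpa using hx
    subst hxe
    simp [List.filter_append, pvFilterErase A hm q hq, hq]
  | case3 A x hx hA y rest' ih =>
    have hm : "" ∈ A := by simpa using hA
    have hxe : x = "" := by simpa using hx
    subst hxe
    rw [ih]
    simp [List.filter_append, List.filter_cons, pvFilterErase A hm q hq, hq]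
    split <;> simp
  | case4 A x hx hA =>
    have hxe : x = "" := by simpa using hx
    subst hxe
    simp [hq]
  | case5 A x hx hA y rest' ih =>
    have hxe : x = "" := by simpa using hx
    subst hxe
    rw [ih]
    simp [List.filter_append, List.filter_cons, hq]
    split <;> simp
  | case6 A x rest hx ih =>
    rw [ih]
    simp [List.filter_append, List.filter_cons]
    split <;> simp

-- counted removal, functionally: drop x if its budget f x is still positive
def pvKf : List String → (String → Int) → List String
  | [], _ => []
  | x :: xs, f => if 0 < f x then pvKf xs (Function.update f x (f x - 1)) else x :: pvKf xs f

lemma pvKf_count : ∀ (xs : List String) (f : String → Int) (v : String), 0 ≤ f v →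
    ((pvKf xs f).count v : Int) = (xs.count v : Int) - min (f v) (xs.count v) := by
  intro xs
  induction xs with
  | nil => intro f v hv; simp [pvKf]; omega
  | cons x xs ih =>
    intro f v hv
    by_cases hx0 : 0 < f x
    · rw [pvKf, if_pos hx0]
      by_cases hxv : x = v
      · subst hxv
        have h1 := ih (Function.update f x (f x - 1)) x (by simp; omega)
        rw [Function.update_self] at h1
        rw [h1]
        simp [List.count_cons]
        omega
      · have h1 := ih (Function.update f x (f x - 1)) v
          (by rw [Function.update_of_ne (Ne.symm hxv)]; exact hv)
        rw [Function.update_of_ne (Ne.symm hxv)] at h1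
        rw [List.count_cons_of_ne hxv, h1]
    · rw [pvKf, if_neg hx0]
      by_cases hxv : x = v
      · subst hxv
        have h0 : f x = 0 := by omega
        rw [List.count_cons_self, List.count_cons_self]
        push_cast
        rw [ih f x hv]
        push_cast
        omega
      · rw [List.count_cons_of_ne hxv, List.count_cons_of_ne hxv]
        exact ih f v hv

lemma pvKf_drop : ∀ (xs : List String) (f : String → Int), (xs.count "" : Int) ≤ f "" →
    pvKf xs f = pvKf (xs.filter (fun l => !(l == ""))) (Function.update f "" 0) := by
  intro xs
  induction xs with
  | nil => intro f _; simp [pvKf]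
  | cons x xs ih =>
    intro f hf
    by_cases hx : x = ""
    · subst hx
      rw [List.count_cons_self] at hf
      have h0 : 0 < f "" := by push_cast at hf; omega
      rw [pvKf, if_pos h0]
      have h1 := ih (Function.update f "" (f "" - 1)) (by simp; push_cast at hf ⊢; omega)
      rw [h1, Function.update_idem]
      simp
    · have hfx : (Function.update f "" 0) x = f x := Function.update_of_ne hx 0 f
      have hcnt : (xs.count "" : Int) ≤ f "" := by
        rw [List.count_cons_of_ne (by simpa using Ne.symm hx)] at hf
        exact hf
      rw [pvKf, show (x :: xs).filter (fun l => !(l == "")) = x :: xs.filter (fun l => !(l == ""))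
            from by simp [List.filter_cons, hx]]
      rw [pvKf, hfx]
      by_cases h0 : 0 < f x
      · rw [if_pos h0, if_pos h0]
        rw [ih (Function.update f x (f x - 1)) (by rw [Function.update_of_ne (by simpa using hx)]; exact hcnt)]
        rw [Function.update_comm (by simpa using hx)]
      · rw [if_neg h0, if_neg h0, ih f hcnt]

lemma pvStripSw (l : String) (h : PySem.Str.startswith l "no " = true) :
    (PySem.Str.strip l == "") = false := by
  have hn : 'n' ∈ l.toList := by
    rw [PySem.Str.startswith_eq] at h
    rw [PySem.Chars.startswith_iff] at h
    exact h.mem (by simp)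
  by_contra hcon
  have hempty : PySem.Chars.strip l.toList = [] := by
    have h5 : PySem.Str.strip l = "" := by
      cases hsl : (PySem.Str.strip l == "") with
      | true => exact beq_iff_eq.mp hsl
      | false => rw [hsl] at hcon; exact absurd rfl hcon
    have := congrArg String.toList h5
    simpa [PySem.Str.toList_strip] using this
  have h1 : ∀ c ∈ PySem.Chars.lstrip l.toList, PySem.Chars.isspace c = true := by
    have h2 : PySem.Chars.rstrip (PySem.Chars.lstrip l.toList) = [] := hempty
    unfold PySem.Chars.rstrip at h2
    have h3 := List.dropWhile_eq_nil_iff.mp (by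
      cases hdw : (PySem.Chars.lstrip l.toList).reverse.dropWhile PySem.Chars.isspace with
      | nil => rfl
      | cons a b => rw [hdw] at h2; simp at h2)
    intro c hc
    exact h3 c (by simpa using hc)
  have hall : ∀ c ∈ l.toList, PySem.Chars.isspace c = true := by
    intro c hc
    have hsplit := List.takeWhile_append_dropWhile (p := PySem.Chars.isspace) (l := l.toList)
    rw [← hsplit] at hc
    rcases List.mem_append.mp hc with h4 | h4
    · exact List.mem_takeWhile_imp h4
    · exact h1 c (by simpa [PySem.Chars.lstrip] using h4)
  exact absurd (hall 'n' hn) (by decide)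

-- proof-side form of pvWhitespaceOnly, phrased through the ports' string primitives
def pvBlank (l : String) : Bool :=
  (PySem.Str.strip l == "") && !(PySem.Str.startswith l "no ") && !(l == "")

lemma pvStripEmptyIff (l : String) :
    (PySem.Str.strip l == "") = true ↔ ∀ c ∈ l.toList, PySem.Chars.isspace c = true := by
  constructor
  · intro hcon
    have hempty : PySem.Chars.strip l.toList = [] := by
      have h5 : PySem.Str.strip l = "" := beq_iff_eq.mp hcon
      have := congrArg String.toList h5
      simpa [PySem.Str.toList_strip] using this
    have h1 : ∀ c ∈ PySem.Chars.lstrip l.toList, PySem.Chars.isspace c = true := by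
      have h2 : PySem.Chars.rstrip (PySem.Chars.lstrip l.toList) = [] := hempty
      unfold PySem.Chars.rstrip at h2
      have h3 := List.dropWhile_eq_nil_iff.mp (by
        cases hdw : (PySem.Chars.lstrip l.toList).reverse.dropWhile PySem.Chars.isspace with
        | nil => rfl
        | cons a b => rw [hdw] at h2; simp at h2)
      intro c hc
      exact h3 c (by simpa using hc)
    intro c hc
    have hsplit := List.takeWhile_append_dropWhile (p := PySem.Chars.isspace) (l := l.toList)
    rw [← hsplit] at hc
    rcases List.mem_append.mp hc with h4 | h4
    · exact List.mem_takeWhile_imp h4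
    · exact h1 c (by simpa [PySem.Chars.lstrip] using h4)
  · intro hall
    have h1 : PySem.Chars.lstrip l.toList = [] := by
      unfold PySem.Chars.lstrip
      exact List.dropWhile_eq_nil_iff.mpr hall
    have h2 : PySem.Chars.strip l.toList = [] := by
      show PySem.Chars.rstrip (PySem.Chars.lstrip l.toList) = []
      rw [h1]
      rfl
    rw [beq_iff_eq, ← String.toList_eq_nil_iff, PySem.Str.toList_strip, h2]

lemma pvSwOfAllSpace (l : String) (hall : ∀ c ∈ l.toList, PySem.Chars.isspace c = true) :
    PySem.Str.startswith l "no " = false := by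
  cases hsw : PySem.Str.startswith l "no " with
  | false => rfl
  | true =>
    have hn : 'n' ∈ l.toList := by
      rw [PySem.Str.startswith_eq, PySem.Chars.startswith_iff] at hsw
      exact hsw.mem (by simp)
    exact absurd (hall 'n' hn) (by decide)

lemma pvBlank_eq (l : String) : pvWhitespaceOnly l = pvBlank l := by
  by_cases hl : l = ""
  · subst hl; decide
  · have hlb : (l == "") = false := by simpa using hl
    have hlt : (l.toList != []) = true := by
      simp [bne, String.toList_eq_nil_iff, hl]
    rw [pvWhitespaceOnly, pvBlank, hlb, hlt]
    by_cases hall : ∀ c ∈ l.toList, PySem.Chars.isspace c = true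
    · rw [List.all_eq_true.mpr hall, (pvStripEmptyIff l).mpr hall, pvSwOfAllSpace l hall]
      rfl
    · have h1 : l.toList.all PySem.Chars.isspace = false := by
        rw [← Bool.not_eq_true, List.all_eq_true]
        exact hall
      have h2 : (PySem.Str.strip l == "") = false := by
        rw [← Bool.not_eq_true]
        intro hcon
        exact hall ((pvStripEmptyIff l).mp hcon)
      rw [h1, h2]
      rfl

lemma pvCountWhitespaceOnly (p : List String) : p.countP pvWhitespaceOnly = p.countP pvBlank :=
  List.countP_congr (fun l _ => by rw [pvBlank_eq])

lemma pvSwEmpty : PySem.Str.startswith "" "no " = false := by decide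

lemma pvCmdsCount (L : List String) :
    (List.map PySem.Str.strip (List.filter (fun l => !PySem.Str.startswith l "no ") L)).count ""
      = L.count "" + L.countP pvBlank := by
  induction L with
  | nil => rfl
  | cons l L ih =>
    by_cases hsw : PySem.Str.startswith l "no " = true
    · have hl : ¬(l = "") := by
        intro he; rw [he, pvSwEmpty] at hsw; exact absurd hsw (by simp)
      rw [List.filter_cons, if_neg (by simp only [hsw, Bool.not_true, Bool.false_eq_true, not_false_eq_true])]
      rw [List.count_cons_of_ne hl, List.countP_cons,
        show pvBlank l = false from by
          simp only [pvBlank, hsw, Bool.not_true, Bool.and_false, Bool.false_and], ih]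
      simp
    · have hsw' : PySem.Str.startswith l "no " = false := by simpa using hsw
      rw [List.filter_cons, if_pos (by simp only [hsw', Bool.not_false])]
      rw [List.map_cons, List.count_cons, List.count_cons, List.countP_cons, ih]
      by_cases hl : l = ""
      · subst hl
        rw [show (PySem.Str.strip "" == "") = true from by decide,
          show pvBlank "" = false from by decide,
          show (("" : String) == "") = true from by decide]
        simp
        omega
      · have hlb : (l == "") = false := by simpa using hl
        rw [hlb]
        by_cases hst : (PySem.Str.strip l == "") = true
        · rw [hst, show pvBlank l = true from by
              simp only [pvBlank, hst, hsw', hlb, Bool.not_false, Bool.true_and, Bool.and_true]]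
          simp
          omega
        · rw [show (PySem.Str.strip l == "") = false from by simpa using hst,
            show pvBlank l = false from by
              simp only [pvBlank, show (PySem.Str.strip l == "") = false from by simpa using hst,
                Bool.false_and]]
          simp

lemma pvNoCount (g : String → List String) (h : ∀ x, (g x).count "" = 0) :
    ∀ (r acc : List String), (r.foldl (fun a l => a ++ g l) acc).count "" = acc.count "" := by
  intro r
  induction r with
  | nil => intro acc; rfl
  | cons x r ih =>
    intro acc
    rw [List.foldl_cons, ih]
    simp [List.count_append, h x]

lemma pvSZero : ∀ (p : List String), pvS p = 0 → pvHasAdj p = false := by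
  intro p
  fun_induction pvS p with
  | case1 => intro _; rfl
  | case2 x => intro _; rfl
  | case3 t ih => intro h; exact absurd h (by omega)
  | case4 y t hy ih => intro h; simp [pvHasAdj, hy, ih h]
  | case5 x y t hx ih => intro h; simp [pvHasAdj, hx, ih h]

lemma pvHasAdj_tail (a : String) (l : List String) (h : pvHasAdj (a :: l) = false) :
    pvHasAdj l = false := by
  cases l with
  | nil => rfl
  | cons b t => simp [pvHasAdj] at h ⊢; exact h.2

-- without adjacent empty lines, A's remove pass is exactly 'filter nonempty'
lemma pvFilterEq : ∀ (n : Nat) (rest : List String) (fuel : Nat) (out : List String),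
    rest.length ≤ n → rest.length ≤ fuel → "" ∉ out → pvHasAdj rest = false →
    pvRemovePassGo fuel (out ++ rest) out.length = out ++ rest.filter (fun s => !(s == "")) := by
  intro n
  induction n with
  | zero =>
    intro rest fuel out h1 _ _ _
    have hr : rest = [] := List.eq_nil_of_length_eq_zero (by omega)
    subst hr
    rw [pvStop _ _ _ (by simp)]
    simp
  | succ n ih =>
    intro rest fuel out h1 h2 hout hadj
    cases rest with
    | nil =>
      rw [pvStop _ _ _ (by simp)]
      simp
    | cons x rest' =>
      obtain ⟨f, rfl⟩ : ∃ f, fuel = f + 1 := ⟨fuel - 1, by simp at h2; omega⟩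
      rw [pvRemovePassGo, dif_pos (by simp)]
      have hx : (out ++ x :: rest')[out.length]'(by simp) = x := by simp
      rw [hx]
      by_cases hc : (PySem.Str.len x == 0) = true
      · have hxe : x = "" := by rw [pvLenZero, beq_iff_eq] at hc; exact hc
        subst hxe
        rw [if_pos hc]
        rw [List.erase_append_right _ hout, List.erase_cons_head]
        cases rest' with
        | nil =>
          rw [pvStop _ _ _ (by simp)]
          simp
        | cons y rest'' =>
          have hy : ¬(y = "") := by
            intro hy; rw [hy] at hadj; simp [pvHasAdj] at hadj
          rw [show out ++ y :: rest'' = (out ++ [y]) ++ rest'' from by simp,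
              show out.length + 1 = (out ++ [y]).length from by simp]
          rw [ih rest'' f (out ++ [y]) (by simp at h1 ⊢; omega) (by simp at h2 ⊢; omega)
              (by simp [hout]; exact fun h => hy h)
              (pvHasAdj_tail y rest'' (pvHasAdj_tail "" (y :: rest'') hadj))]
          simp [hy]
      · have hxne : ¬(x = "") := by
          intro hxe; rw [pvLenZero] at hc; simp [hxe] at hc
        rw [if_neg hc]
        rw [show out ++ x :: rest' = (out ++ [x]) ++ rest' from by simp,
            show out.length + 1 = (out ++ [x]).length from by simp]
        rw [ih rest' f (out ++ [x]) (by simp at h1 ⊢; omega) (by simp at h2 ⊢; omega)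
            (by simp [hout]; exact fun h => hxne h)
            (pvHasAdj_tail x rest' hadj)]
        simp [hxne]

lemma pvCleanPass (p : List String) (h : pvHasAdj p = false) :
    pvRemovePass p = p.filter (fun s => !(s == "")) := by
  have := pvFilterEq p.length p p.length [] le_rfl le_rfl (by simp) h
  simpa [pvRemovePass] using this

lemma pvKf_bump (c0 : List String) : ∀ (f : String → Int) (l : String), (∀ v, 0 ≤ f v) →
    pvKf c0 (Function.update f l (f l + 1)) = pvKf (if c0.contains l then c0.erase l else c0) f := by
  induction c0 with
  | nil => intro f l _; simp [pvKf]
  | cons x xs ih =>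
    intro f l hf
    by_cases hx : x = l
    · subst hx
      rw [pvKf, if_pos (by simp; have := hf x; omega)]
      simp only [Function.update_self]
      rw [Function.update_idem, show f x + 1 - 1 = f x from by omega, Function.update_eq_self]
      rw [if_pos (by simp), List.erase_cons_head]
    · have hlx : l ≠ x := Ne.symm hx
      have hul : Function.update f l (f l + 1) x = f x := Function.update_of_ne hx _ _
      have hcl' : (x :: xs).contains l = xs.contains l := by
        simp [hlx]
      rw [pvKf, hul]
      by_cases hfx : 0 < f x
      · rw [if_pos hfx]
        have hg : ∀ v, 0 ≤ Function.update f x (f x - 1) v := by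
          intro v
          by_cases hv : v = x
          · subst hv; simp; omega
          · rw [Function.update_of_ne hv]; exact hf v
        rw [Function.update_comm hlx]
        have hfl : f l = Function.update f x (f x - 1) l := (Function.update_of_ne hlx _ _).symm
        rw [hfl, ih _ l hg]
        by_cases hcl : xs.contains l
        · rw [if_pos hcl, if_pos (by rw [hcl']; exact hcl),
            List.erase_cons_tail (by simp [hx]), pvKf, if_pos hfx]
        · rw [if_neg (by simpa using hcl), if_neg (by rw [hcl']; simpa using hcl),
            pvKf, if_pos hfx]
      · rw [if_neg hfx, ih f l hf]
        by_cases hcl : xs.contains l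
        · rw [if_pos hcl, if_pos (by rw [hcl']; exact hcl),
            List.erase_cons_tail (by simp [hx]), pvKf, if_neg hfx]
        · rw [if_neg (by simpa using hcl), if_neg (by rw [hcl']; simpa using hcl),
            pvKf, if_neg hfx]

lemma pvEraseFold (rs : List String) : ∀ (c0 : List String),
    rs.foldl (fun c l => if c.contains l then c.erase l else c) c0
      = pvKf c0 (fun v => (rs.count v : Int)) := by
  induction rs with
  | nil =>
    intro c0
    simp only [List.foldl_nil, List.count_nil]
    induction c0 with
    | nil => rfl
    | cons x xs ih => rw [pvKf, if_neg (by omega), ← ih]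
  | cons l ls ih =>
    intro c0
    rw [List.foldl_cons, ih]
    have hcnt : (fun v => ((l :: ls).count v : Int))
        = Function.update (fun v => (ls.count v : Int)) l ((ls.count l : Int) + 1) := by
      funext v
      by_cases hv : v = l
      · subst hv; simp
      · rw [Function.update_of_ne hv]
        simp [Ne.symm hv]
    rw [hcnt, pvKf_bump c0 _ l (by intro v; positivity)]

lemma pvFoldB (cmds : List String) : ∀ (acc : List String) (d : PySem.Dict String Int),
    (cmds.foldl (fun s cmd =>
        if 0 < s.2.getD cmd 0 then (s.1, s.2.insert cmd (s.2.getD cmd 0 - 1))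
        else (s.1 ++ [cmd], s.2)) (acc, d)).1
      = acc ++ pvKf cmds (fun v => d.getD v 0) := by
  induction cmds with
  | nil => intro acc d; simp [pvKf]
  | cons c cs ih =>
    intro acc d
    rw [List.foldl_cons]
    by_cases hc : 0 < d.getD c 0
    · simp only [if_pos hc]
      rw [ih acc (d.insert c (d.getD c 0 - 1))]
      rw [pvKf, if_pos hc]
      congr 1
      congr 1
      funext v
      rw [PySem.Dict.getD_insert]
      by_cases hv : v = c
      · subst hv; simp
      · rw [if_neg hv, Function.update_of_ne hv]
    · simp only [if_neg hc]
      rw [ih (acc ++ [c]) d, pvKf, if_neg hc]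
      simp

lemma pvNosEq (r fl : List String) :
    r.foldl (fun acc line => (fl.map PySem.Str.strip).foldl
        (fun a nl => if line == pvLstripNo nl then a ++ [nl] else a) acc) []
      = r.foldl (fun acc l => acc ++
          ((fl.map (fun x => (pvLstripNo (PySem.Str.strip x), PySem.Str.strip x))).foldl
            (fun d q => d.modify q.1 [] (fun z => z ++ [q.2]))
            (PySem.Dict.empty : PySem.Dict String (List String))).getD l []) [] := by
  have hg : ∀ l, ((fl.map (fun x => (pvLstripNo (PySem.Str.strip x), PySem.Str.strip x))).foldl
        (fun d q => d.modify q.1 [] (fun z => z ++ [q.2]))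
        (PySem.Dict.empty : PySem.Dict String (List String))).getD l []
      = (fl.map PySem.Str.strip).filter (fun nl => l == pvLstripNo nl) := by
    intro l
    rw [PySem.Dict.getD_foldl_modify_append, PySem.Dict.getD_empty, List.nil_append,
      List.filter_map, List.map_map, List.filter_map]
    apply congrArg
    apply List.filter_congr
    intro x _
    exact Bool.beq_comm
  have hstep : (fun acc line => (fl.map PySem.Str.strip).foldl
        (fun a nl => if line == pvLstripNo nl then a ++ [nl] else a) acc)
      = fun acc line => acc ++ (fl.map PySem.Str.strip).filter (fun nl => line == pvLstripNo nl) := by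
    funext acc line
    exact PySem.List.foldl_append_if_eq_filter _ _ acc
  rw [hstep]
  symm
  apply PySem.List.foldl_congr_mem
  intro acc x _
  rw [hg x]

lemma pvMain (p r : List String) (hadj : pvHasAdj p = false) :
    compare_proposed_to_running p r = compare_proposed_to_running_alt p r := by
  unfold compare_proposed_to_running compare_proposed_to_running_alt
  rw [pvCleanPass p hadj]
  dsimp only
  rw [show (List.foldl
        (fun s line =>
          (List.foldl (fun acc nl => if line == pvLstripNo nl then acc ++ [nl] else acc) s.1 (List.map PySem.Str.strip (List.filter (fun l => PySem.Str.startswith l "no ") (List.filter (fun s => !(s == "")) p))),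
            if s.2.contains line then s.2.erase line else s.2))
        (([] : List String), (List.map PySem.Str.strip (List.filter (fun l => !PySem.Str.startswith l "no ") (List.filter (fun s => !(s == "")) p)))) r)
      = (List.foldl (fun acc line => List.foldl
            (fun a nl => if line == pvLstripNo nl then a ++ [nl] else a) acc (List.map PySem.Str.strip (List.filter (fun l => PySem.Str.startswith l "no ") (List.filter (fun s => !(s == "")) p)))) [] r,
         List.foldl (fun c line => if c.contains line then c.erase line else c) (List.map PySem.Str.strip (List.filter (fun l => !PySem.Str.startswith l "no ") (List.filter (fun s => !(s == "")) p))) r)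
    from PySem.List.foldl_prod_mk
      (fun acc line => List.foldl
        (fun a nl => if line == pvLstripNo nl then a ++ [nl] else a) acc (List.map PySem.Str.strip (List.filter (fun l => PySem.Str.startswith l "no ") (List.filter (fun s => !(s == "")) p))))
      (fun c line => if c.contains line then c.erase line else c) r [] (List.map PySem.Str.strip (List.filter (fun l => !PySem.Str.startswith l "no ") (List.filter (fun s => !(s == "")) p)))]
  rw [pvEraseFold r, pvFoldB, List.nil_append,
    pvNosEq r (List.filter (fun l => PySem.Str.startswith l "no ") (List.filter (fun s => !(s == "")) p))]
  dsimp only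
  congr 1
  congr 1
  funext v
  rw [PySem.Dict.getD_foldl_modify_add_one, PySem.Dict.getD_empty]
  simp


-- normal forms: both ports as 'counted removal ++ no-commands fold'
def pvCmds (X : List String) : List String :=
  (X.filter (fun l => !PySem.Str.startswith l "no ")).map PySem.Str.strip

def pvNos (X : List String) : List String :=
  (X.filter (fun l => PySem.Str.startswith l "no ")).map PySem.Str.strip

def pvNoFold (ncl : List String) (r : List String) : List String :=
  r.foldl (fun acc line => acc ++ ncl.filter (fun nl => line == pvLstripNo nl)) []

def pvBudget (r : List String) : String → Int := fun v => (r.count v : Int)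

lemma pvAForm (p r : List String) :
    compare_proposed_to_running p r
      = pvKf (pvCmds (pvGoAbs [] p)) (pvBudget r) ++ pvNoFold (pvNos (pvGoAbs [] p)) r := by
  unfold compare_proposed_to_running
  dsimp only
  rw [show (List.foldl
        (fun s line =>
          (List.foldl (fun acc nl => if line == pvLstripNo nl then acc ++ [nl] else acc) s.1 (List.map PySem.Str.strip (List.filter (fun l => PySem.Str.startswith l "no ") (pvRemovePass p))),
            if s.2.contains line then s.2.erase line else s.2))
        (([] : List String), (List.map PySem.Str.strip (List.filter (fun l => !PySem.Str.startswith l "no ") (pvRemovePass p)))) r)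
      = (List.foldl (fun acc line => List.foldl
            (fun a nl => if line == pvLstripNo nl then a ++ [nl] else a) acc (List.map PySem.Str.strip (List.filter (fun l => PySem.Str.startswith l "no ") (pvRemovePass p)))) [] r,
         List.foldl (fun c line => if c.contains line then c.erase line else c) (List.map PySem.Str.strip (List.filter (fun l => !PySem.Str.startswith l "no ") (pvRemovePass p))) r)
    from PySem.List.foldl_prod_mk
      (fun acc line => List.foldl
        (fun a nl => if line == pvLstripNo nl then a ++ [nl] else a) acc (List.map PySem.Str.strip (List.filter (fun l => PySem.Str.startswith l "no ") (pvRemovePass p))))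
      (fun c line => if c.contains line then c.erase line else c) r [] (List.map PySem.Str.strip (List.filter (fun l => !PySem.Str.startswith l "no ") (pvRemovePass p)))]
  rw [pvEraseFold r, pvRemovePass_eq]
  have hstep : (fun acc line => List.foldl
        (fun a nl => if line == pvLstripNo nl then a ++ [nl] else a) acc
        (List.map PySem.Str.strip (List.filter (fun l => PySem.Str.startswith l "no ") (pvGoAbs [] p))))
      = fun acc line => acc ++ (List.map PySem.Str.strip (List.filter (fun l => PySem.Str.startswith l "no ") (pvGoAbs [] p))).filter (fun nl => line == pvLstripNo nl) := by
    funext acc line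
    exact PySem.List.foldl_append_if_eq_filter _ _ acc
  rw [hstep]
  rfl

lemma pvGroupsGetD (cleaned : List String) (l : String) :
    (((cleaned.filter (fun l => PySem.Str.startswith l "no ")).map
        (fun x => (pvLstripNo (PySem.Str.strip x), PySem.Str.strip x))).foldl
      (fun d q => d.modify q.1 [] (fun z => z ++ [q.2]))
      (PySem.Dict.empty : PySem.Dict String (List String))).getD l []
    = (pvNos cleaned).filter (fun nl => l == pvLstripNo nl) := by
  rw [PySem.Dict.getD_foldl_modify_append, PySem.Dict.getD_empty, List.nil_append,
    List.filter_map, List.map_map, pvNos, List.filter_map]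
  apply congrArg
  apply List.filter_congr
  intro x _
  exact Bool.beq_comm

lemma pvBForm (p r : List String) :
    compare_proposed_to_running_alt p r
      = pvKf (pvCmds (p.filter (fun l => !(l == "")))) (pvBudget r)
          ++ pvNoFold (pvNos (p.filter (fun l => !(l == "")))) r := by
  unfold compare_proposed_to_running_alt
  dsimp only
  rw [pvFoldB]
  have hbud : (fun v => (r.foldl (fun d l => d.modify l 0 (fun x => x + 1))
        (PySem.Dict.empty : PySem.Dict String Int)).getD v 0) = pvBudget r := by
    funext v
    rw [PySem.Dict.getD_foldl_modify_add_one, PySem.Dict.getD_empty]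
    simp [pvBudget]
  rw [List.nil_append, hbud]
  congr 1
  rw [pvNoFold]
  apply PySem.List.foldl_congr_mem
  intro acc x _
  rw [pvGroupsGetD]

lemma pvNosCount0 (X : List String) : (pvNos X).count "" = 0 := by
  rw [List.count_eq_zero]
  intro hmem
  rw [pvNos, List.mem_map] at hmem
  obtain ⟨l, hl, hstrip⟩ := hmem
  rw [List.mem_filter] at hl
  have := pvStripSw l hl.2
  rw [hstrip] at this
  simp at this

lemma pvNoFoldCount0 (ncl r : List String) (h : ncl.count "" = 0) :
    (pvNoFold ncl r).count "" = 0 := by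
  rw [pvNoFold, pvNoCount (fun line => ncl.filter (fun nl => line == pvLstripNo nl))]
  · rfl
  · intro x
    rw [List.count_eq_zero]
    intro hmem
    exact absurd (List.mem_of_mem_filter hmem) (List.count_eq_zero.mp h)

lemma pvCmdsACount (p : List String) :
    (pvCmds (pvGoAbs [] p)).count "" = pvS p + p.countP pvBlank := by
  rw [pvCmds, show ((pvGoAbs [] p).filter (fun l => !PySem.Str.startswith l "no ")).map PySem.Str.strip
      = List.map PySem.Str.strip (List.filter (fun l => !PySem.Str.startswith l "no ") (pvGoAbs [] p)) from rfl,
    pvCmdsCount]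
  have h1 : (pvGoAbs [] p).count "" = pvS p := by
    have := pvGoCount [] p
    simpa using this
  have h2 : (pvGoAbs [] p).countP pvBlank = p.countP pvBlank := by
    rw [List.countP_eq_length_filter, List.countP_eq_length_filter,
      pvGoFilter pvBlank (by decide) [] p]
    simp
  omega

lemma pvCmdsBCount (p : List String) :
    (pvCmds (p.filter (fun l => !(l == "")))).count "" = p.countP pvBlank := by
  rw [pvCmds, show ((p.filter (fun l => !(l == ""))).filter (fun l => !PySem.Str.startswith l "no ")).map PySem.Str.strip
      = List.map PySem.Str.strip (List.filter (fun l => !PySem.Str.startswith l "no ") (p.filter (fun l => !(l == "")))) from rfl,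
    pvCmdsCount]
  have h1 : (p.filter (fun l => !(l == ""))).count "" = 0 := by
    rw [List.count_eq_zero]
    intro hmem
    rw [List.mem_filter] at hmem
    simp at hmem
  have h2 : (p.filter (fun l => !(l == ""))).countP pvBlank = p.countP pvBlank := by
    rw [List.countP_filter]
    apply List.countP_congr
    intro l _
    by_cases hl : l = ""
    · subst hl; simp [pvBlank]
    · simp [pvBlank, hl]
  omega

lemma pvNosEqAB (p : List String) :
    pvNos (pvGoAbs [] p) = pvNos (p.filter (fun l => !(l == ""))) := by
  rw [pvNos, pvNos]
  apply congrArg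
  rw [pvGoFilter (fun l => PySem.Str.startswith l "no ") pvSwEmpty [] p]
  rw [List.filter_filter]
  simp only [List.filter_nil, List.nil_append]
  apply List.filter_congr
  intro l _
  by_cases hl : l = ""
  · subst hl
    simp [show PySem.Chars.startswith [] ['n', 'o', ' '] = false from by decide]
  · simp [hl]

lemma pvCmdsFilterAB (p : List String) :
    (pvCmds (pvGoAbs [] p)).filter (fun l => !(l == ""))
      = (pvCmds (p.filter (fun l => !(l == "")))).filter (fun l => !(l == "")) := by
  rw [pvCmds, pvCmds, List.filter_map, List.filter_map]
  apply congrArg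
  rw [List.filter_filter, List.filter_filter,
    pvGoFilter (fun a => ((fun l => !(l == "")) ∘ PySem.Str.strip) a && !PySem.Str.startswith a "no ") (by decide) [] p,
    List.filter_filter]
  simp only [List.filter_nil, List.nil_append]
  apply List.filter_congr
  intro l _
  by_cases hl : l = ""
  · subst hl
    simp [show (PySem.Str.strip "" == "") = true from by decide]
  · simp [hl]

-- ===== VERDICT (by name: the statements are the Claim_ definitions above) =====
theorem compare_proposed_to_running_spec : Claim_unchanged_compare_proposed_to_running := by
  intro p r _hDom hD
  by_cases hS : pvS p = 0
  · exact pvMain p r (pvSZero p hS)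
  · have h1 : 1 ≤ pvS p := by omega
    have hc : p.countP pvBlank + pvS p ≤ r.count "" := by
      rw [← pvCountWhitespaceOnly]
      by_contra hcon
      exact hD ⟨h1, by omega⟩
    rw [pvAForm, pvBForm, pvNosEqAB]
    congr 1
    rw [pvKf_drop (pvCmds (pvGoAbs [] p)) (pvBudget r)
        (by rw [pvCmdsACount]; show _ ≤ (r.count "" : Int); push_cast; omega),
      pvKf_drop (pvCmds (p.filter (fun l => !(l == "")))) (pvBudget r)
        (by rw [pvCmdsBCount]; show _ ≤ (r.count "" : Int); push_cast; omega),
      pvCmdsFilterAB]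

theorem compare_proposed_to_running_changed : Claim_changed_compare_proposed_to_running := by
  unfold Claim_changed_compare_proposed_to_running; decide

theorem compare_proposed_to_running_tight : Claim_exact_compare_proposed_to_running := by
  intro p r _hDom hD heq
  obtain ⟨h1, h2⟩ := hD
  rw [pvCountWhitespaceOnly] at h2
  have hcnt := congrArg (List.count "") heq
  rw [pvAForm, pvBForm, List.count_append, List.count_append,
    pvNoFoldCount0 _ r (pvNosCount0 _), pvNoFoldCount0 _ r (pvNosCount0 _)] at hcnt
  have hA := pvKf_count (pvCmds (pvGoAbs [] p)) (pvBudget r) ""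
    (by show (0 : Int) ≤ (r.count "" : Int); positivity)
  have hB := pvKf_count (pvCmds (p.filter (fun l => !(l == "")))) (pvBudget r) ""
    (by show (0 : Int) ≤ (r.count "" : Int); positivity)
  rw [pvCmdsACount] at hA
  rw [pvCmdsBCount] at hB
  have hbud : pvBudget r "" = (r.count "" : Int) := rfl
  rw [hbud] at hA hB
  omega
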